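-- pv_equiv track=rewrite | github.com/FokaKefir/DiszkretMatekPython | lab02/lab02.py | getNumberByDigitsOfFactorial
-- ===== SOURCE A (Python) =====
-- def getNumberByDigitsOfFactorial(digits):
--     fact = 10 ** digits
--     n = 2
--     mul = 1
--     while n * mul < fact:
--         mul *= n
--         n += 1
--     return n - 1
-- ===== SOURCE B (Python) =====
-- def getNumberByDigitsOfFactorial(digits):
--     target = 10 ** digits
--
--     def prod_range(a, b):
--         # product of the integers a..b inclusive (a <= b), balanced product tree
--         if a == b:
--             return a
--         m = (a + b) // 2
--         return prod_range(a, m) * prod_range(m + 1, b)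
--
--     # galloping phase: double lo while (2*lo)! < target, keeping P = lo! exactly
--     lo, P = 1, 1
--     Q = P * prod_range(lo + 1, 2 * lo)
--     while Q < target:
--         lo, P = 2 * lo, Q
--         Q = P * prod_range(lo + 1, 2 * lo)
--     hi = 2 * lo
--     # binary search on (lo, hi]: invariant P = lo!, (lo == 1 or lo! < target), hi! >= target
--     while lo + 1 < hi:
--         mid = (lo + hi) // 2
--         Q = P * prod_range(lo + 1, mid)   # = mid!
--         if Q < target:
--             lo, P = mid, Q
--         else:
--             hi = mid
--     return lo
-- ===== Notes on version B (the rewrite author's own statement) =====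
-- stated objective: faster
-- what changed: A multiplies one factor at a time until the running factorial reaches 10**digits; B instead brackets the answer by galloping doubling and then binary-searches it, computing each needed block of consecutive factors with a balanced product tree and reusing the exact factorial of the current lower bound.
import Mathlib
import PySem

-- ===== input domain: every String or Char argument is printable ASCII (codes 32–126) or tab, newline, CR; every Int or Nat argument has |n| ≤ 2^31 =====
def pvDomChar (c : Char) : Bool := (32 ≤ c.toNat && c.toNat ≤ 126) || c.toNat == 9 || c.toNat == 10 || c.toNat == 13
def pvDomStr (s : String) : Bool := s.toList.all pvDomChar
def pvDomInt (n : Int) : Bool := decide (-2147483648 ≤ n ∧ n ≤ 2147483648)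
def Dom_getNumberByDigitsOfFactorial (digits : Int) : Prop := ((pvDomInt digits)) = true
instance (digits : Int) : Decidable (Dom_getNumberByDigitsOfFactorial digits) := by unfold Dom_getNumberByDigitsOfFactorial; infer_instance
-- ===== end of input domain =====

-- B replaces A's one-factor-at-a-time multiply-until-overshoot loop by galloping doubling plus
-- binary search, with balanced product trees for the blocks of consecutive factors (objective: faster).
-- Each loop is ported with a fuel counter that only makes the recursion structural; the initial
-- fuel is an upper bound on the number of iterations, so the fuel-exhausted branch is never
-- reached (proved below via the fuel premises of the invariant lemmas).

-- ===== PORT A =====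
-- the while loop of A
def loopAF (fuel : Nat) (fact n mul : Int) : Int :=
  match fuel with
  | 0 => n - 1
  | fuel + 1 => if n * mul < fact then loopAF fuel fact (n + 1) (mul * n) else n - 1

def getNumberByDigitsOfFactorial (digits : Int) : Int :=
  -- fact = 10 ** digits; for digits < 0 Python yields the float 10.0**digits ∈ (0,1), whose only
  -- use is the comparison n*mul < fact with n*mul ≥ 2, for which the value 0 is exact
  let fact : Int := if digits < 0 then 0 else 10 ^ digits.toNat
  -- n*mul starts at 2 and strictly increases each iteration, so this fuel is never exhausted
  loopAF ((fact - 2).toNat + 1) fact 2 1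

-- ===== PORT B =====
-- product of the integers a..b inclusive (a ≤ b), balanced product tree
def prodRangeF (fuel : Nat) (a b : Int) : Int :=
  match fuel with
  | 0 => 1
  | fuel + 1 =>
    if a = b then a
    else
      let m := PySem.Int.floordiv (a + b) 2
      prodRangeF fuel a m * prodRangeF fuel (m + 1) b

-- each split shrinks b - a, so (b - a).toNat + 1 fuel is never exhausted
def prodRange (a b : Int) : Int := prodRangeF ((b - a).toNat + 1) a b

-- the galloping 'while Q < target' loop: returns the final (lo, P)
def gallopBF (fuel : Nat) (target lo P : Int) : Int × Int :=
  match fuel with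
  | 0 => (lo, P)
  | fuel + 1 =>
    let Q := P * prodRange (lo + 1) (2 * lo)
    if Q < target then gallopBF fuel target (2 * lo) Q else (lo, P)

-- the binary-search 'while lo + 1 < hi' loop
def bsearchBF (fuel : Nat) (target lo hi P : Int) : Int :=
  match fuel with
  | 0 => lo
  | fuel + 1 =>
    if lo + 1 < hi then
      let mid := PySem.Int.floordiv (lo + hi) 2
      let Q := P * prodRange (lo + 1) mid
      if Q < target then bsearchBF fuel target mid hi Q
      else bsearchBF fuel target lo mid P
    else lo

def getNumberByDigitsOfFactorial_alt (digits : Int) : Int :=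
  -- target = 10 ** digits; same float note as in the port of A: for digits < 0 the value 0 is
  -- exact for the comparisons Q < target (Q ≥ 2) the program performs
  let target : Int := if digits < 0 then 0 else 10 ^ digits.toNat
  -- P starts at 1 and strictly increases each iteration, resp. hi - lo strictly shrinks,
  -- so neither fuel is ever exhausted
  let lp := gallopBF ((target - 1).toNat + 1) target 1 1
  bsearchBF ((2 * lp.1 - lp.1).toNat + 1) target lp.1 (2 * lp.1) lp.2

-- ===== PRECONDITION & SPEC =====
def Spec_getNumberByDigitsOfFactorial (digits : Int) (out : Int) : Prop := out = getNumberByDigitsOfFactorial_alt digits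
instance (digits : Int) (out : Int) : Decidable (Spec_getNumberByDigitsOfFactorial digits out) := by unfold Spec_getNumberByDigitsOfFactorial; infer_instance

-- ===== CLAIM (what is proved, stated in full; the proofs are below) =====
def Claim_equal_getNumberByDigitsOfFactorial : Prop := ∀ (digits : Int), Dom_getNumberByDigitsOfFactorial digits → Spec_getNumberByDigitsOfFactorial digits (getNumberByDigitsOfFactorial digits)

-- ===== LEMMAS AND PROOFS =====

-- ifac n = n! for n ≥ 1, and 1 for n ≤ 1
def ifac (n : Int) : Int := (Nat.factorial n.toNat : Int)

theorem prodIoc_mul (a b c : Int) (h1 : a ≤ b) (h2 : b ≤ c) :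
    (∏ i ∈ Finset.Ioc a b, i) * (∏ i ∈ Finset.Ioc b c, i) = ∏ i ∈ Finset.Ioc a c, i := by
  rw [← Finset.prod_union (Finset.Ioc_disjoint_Ioc_of_le le_rfl),
    Finset.Ioc_union_Ioc_eq_Ioc h1 h2]

theorem factorial_cast_eq_prod (k : Nat) :
    (Nat.factorial k : Int) = ∏ i ∈ Finset.Ioc (1 : Int) (k : Int), i := by
  induction k with
  | zero =>
    rw [show ((0 : Nat) : Int) = 0 by norm_num, Finset.Ioc_eq_empty (by omega)]
    simp [Nat.factorial]
  | succ k ih =>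
    by_cases hk : k = 0
    · subst hk
      rw [show ((0 + 1 : Nat) : Int) = 1 by norm_num, Finset.Ioc_eq_empty (by omega)]
      simp [Nat.factorial]
    · have h1 : (1 : Int) ≤ (k : Int) := by exact_mod_cast Nat.one_le_iff_ne_zero.mpr hk
      have hsplit := prodIoc_mul 1 (k : Int) ((k : Int) + 1) h1 (by omega)
      have hsing : Finset.Ioc ((k : Int)) ((k : Int) + 1) = {((k : Int) + 1)} := by
        apply Finset.ext; intro x; simp only [Finset.mem_Ioc, Finset.mem_singleton]; omega
      rw [show (((k + 1 : Nat)) : Int) = (k : Int) + 1 by push_cast; ring,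
        ← hsplit, ← ih, hsing, Finset.prod_singleton, Nat.factorial_succ]
      push_cast; ring

theorem ifac_eq_prod (n : Int) : ifac n = ∏ i ∈ Finset.Ioc (1 : Int) n, i := by
  unfold ifac
  by_cases hn : 0 ≤ n
  · rw [factorial_cast_eq_prod n.toNat, Int.toNat_of_nonneg hn]
  · rw [Finset.Ioc_eq_empty (by omega), show n.toNat = 0 by omega]
    simp [Nat.factorial]

-- midpoint bounds of the product tree
theorem pvM_ge (a b : Int) (h : a ≤ b) (_hne : ¬a = b) : a ≤ PySem.Int.floordiv (a + b) 2 := by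
  rw [PySem.Int.le_floordiv_iff_mul_le (by norm_num)]; omega

theorem pvM_lt (a b : Int) (h : a ≤ b) (hne : ¬a = b) : PySem.Int.floordiv (a + b) 2 < b := by
  rw [PySem.Int.floordiv_lt_iff_lt_mul (by norm_num)]; omega

theorem prodRangeF_eq_prod : ∀ (fuel : Nat) (a b : Int), a ≤ b → (b - a).toNat < fuel →
    prodRangeF fuel a b = ∏ i ∈ Finset.Ioc (a - 1) b, i := by
  intro fuel
  induction fuel with
  | zero => intro a b h hf; exact absurd hf (Nat.not_lt_zero _)
  | succ fuel ih =>
    intro a b h hf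
    by_cases heq : a = b
    · subst heq
      rw [show Finset.Ioc (a - 1) a = {a} by
        apply Finset.ext; intro x; simp only [Finset.mem_Ioc, Finset.mem_singleton]; omega]
      simp [prodRangeF]
    · have hm1 := pvM_ge a b h heq
      have hm2 := pvM_lt a b h heq
      rw [show prodRangeF (fuel + 1) a b
            = prodRangeF fuel a (PySem.Int.floordiv (a + b) 2)
              * prodRangeF fuel (PySem.Int.floordiv (a + b) 2 + 1) b by
          simp [prodRangeF, heq]]
      rw [ih a (PySem.Int.floordiv (a + b) 2) hm1 (by omega),
        ih (PySem.Int.floordiv (a + b) 2 + 1) b (by omega) (by omega),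
        show PySem.Int.floordiv (a + b) 2 + 1 - 1 = PySem.Int.floordiv (a + b) 2 by ring]
      exact prodIoc_mul (a - 1) (PySem.Int.floordiv (a + b) 2) b (by omega) (by omega)

theorem prodRange_eq_prod (a b : Int) (h : a ≤ b) :
    prodRange a b = ∏ i ∈ Finset.Ioc (a - 1) b, i := by
  exact prodRangeF_eq_prod ((b - a).toNat + 1) a b h (by omega)

theorem ifac_mul_prodRange (n m : Int) (hn : 1 ≤ n) (h : n + 1 ≤ m) :
    ifac n * prodRange (n + 1) m = ifac m := by
  rw [ifac_eq_prod, ifac_eq_prod, prodRange_eq_prod (n + 1) m h, show n + 1 - 1 = n by ring]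
  exact prodIoc_mul 1 n m (by omega) (by omega)

theorem ifac_pos (n : Int) : 1 ≤ ifac n := by
  unfold ifac
  exact_mod_cast Nat.one_le_iff_ne_zero.mpr (Nat.factorial_ne_zero _)

theorem prodRange_ge_left (a b : Int) (h : a ≤ b) (ha : 1 ≤ a) : a ≤ prodRange a b := by
  rw [prodRange_eq_prod a b h]
  have hmem : a ∈ Finset.Ioc (a - 1) b := by simp only [Finset.mem_Ioc]; omega
  have hpos : ∀ i ∈ Finset.Ioc (a - 1) b, (1 : Int) ≤ i := by
    intro i hi; simp only [Finset.mem_Ioc] at hi; omega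
  have h1 : (1 : Int) ≤ ∏ i ∈ (Finset.Ioc (a - 1) b).erase a, i :=
    Finset.one_le_prod (fun i hi => hpos i (Finset.mem_of_mem_erase hi))
  have h3 : a * ∏ i ∈ (Finset.Ioc (a - 1) b).erase a, i = ∏ i ∈ Finset.Ioc (a - 1) b, i :=
    Finset.mul_prod_erase _ (fun i => i) hmem
  nlinarith

theorem ifac_succ (n : Int) (hn : 1 ≤ n) : ifac (n + 1) = ifac n * (n + 1) := by
  have h := ifac_mul_prodRange n (n + 1) hn (by omega)
  rw [← h]
  congr 1
  rw [prodRange_eq_prod (n + 1) (n + 1) (le_refl _)]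
  rw [show Finset.Ioc (n + 1 - 1) (n + 1) = {n + 1} by
    apply Finset.ext; intro x; simp only [Finset.mem_Ioc, Finset.mem_singleton]; omega]
  simp

theorem ifac_mono {n m : Int} (hn : 1 ≤ n) (h : n ≤ m) : ifac n ≤ ifac m := by
  rcases eq_or_lt_of_le h with rfl | hlt
  · exact le_refl _
  · have hpr := prodRange_ge_left (n + 1) m (by omega) (by omega)
    have := ifac_mul_prodRange n m hn (by omega)
    nlinarith [ifac_pos n]

-- the common characterisation of both results
def AnsIs (T r : Int) : Prop := 1 ≤ r ∧ (r = 1 ∨ ifac r < T) ∧ T ≤ ifac (r + 1)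

theorem AnsIs_unique {T r s : Int} (hr : AnsIs T r) (hs : AnsIs T s) : r = s := by
  obtain ⟨hr1, hr2, hr3⟩ := hr
  obtain ⟨hs1, hs2, hs3⟩ := hs
  by_contra hne
  rcases lt_or_gt_of_ne hne with hlt | hlt
  · have hmono := ifac_mono (show 1 ≤ r + 1 by omega) (show r + 1 ≤ s by omega)
    rcases hs2 with h1 | h2 <;> omega
  · have hmono := ifac_mono (show 1 ≤ s + 1 by omega) (show s + 1 ≤ r by omega)
    rcases hr2 with h1 | h2 <;> omega

theorem loopAF_ans (fact : Int) : ∀ (fuel : Nat) (n mul : Int), 2 ≤ n → 1 ≤ mul →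
    (fact - n * mul).toNat < fuel → mul = ifac (n - 1) → (n = 2 ∨ ifac (n - 1) < fact) →
    AnsIs fact (loopAF fuel fact n mul) := by
  intro fuel
  induction fuel with
  | zero => intro n mul _ _ hf _ _; exact absurd hf (Nat.not_lt_zero _)
  | succ fuel ih =>
    intro n mul hn hm hf hfac hor
    have hs : ifac n = ifac (n - 1) * n := by
      have h0 := ifac_succ (n - 1) (by omega)
      rw [show n - 1 + 1 = n by ring] at h0
      exact h0
    by_cases h : n * mul < fact
    · rw [show loopAF (fuel + 1) fact n mul = loopAF fuel fact (n + 1) (mul * n) by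
        simp [loopAF, h]]
      have hprod : mul * n = ifac n := by rw [hs, ← hfac]
      refine ih (n + 1) (mul * n) (by omega) (by nlinarith) ?_ ?_ ?_
      · -- fuel bound: n*mul < (n+1)*(mul*n) since n ≥ 2, mul ≥ 1
        have _hn0 : (0 : Int) < n := by omega
        have _hm0 : (0 : Int) < mul := by omega
        have h0 : (0 : Int) < n * n * mul := by positivity
        have h1 : n * mul < (n + 1) * (mul * n) := by nlinarith
        omega
      · rw [show n + 1 - 1 = n by ring]; exact hprod
      · right
        rw [show n + 1 - 1 = n by ring, ← hprod]
        have hc : mul * n = n * mul := mul_comm mul n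
        linarith
    · rw [show loopAF (fuel + 1) fact n mul = n - 1 by simp [loopAF, h]]
      refine ⟨by omega, ?_, ?_⟩
      · rcases hor with h2 | hlt
        · left; omega
        · right; exact hlt
      · rw [show n - 1 + 1 = n by ring, hs, ← hfac]
        have hc : mul * n = n * mul := mul_comm mul n
        have := not_lt.mp h
        linarith

theorem bsearchBF_ans (target : Int) : ∀ (fuel : Nat) (lo hi P : Int),
    (hi - lo).toNat < fuel → 1 ≤ lo → lo < hi → P = ifac lo →
    (lo = 1 ∨ ifac lo < target) → target ≤ ifac hi →
    AnsIs target (bsearchBF fuel target lo hi P) := by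
  intro fuel
  induction fuel with
  | zero => intro lo hi P hf _ _ _ _ _; exact absurd hf (Nat.not_lt_zero _)
  | succ fuel ih =>
    intro lo hi P hf hlo hlt hP hor hhi
    by_cases h : lo + 1 < hi
    · have hm1 : lo + 1 ≤ PySem.Int.floordiv (lo + hi) 2 := by
        rw [PySem.Int.le_floordiv_iff_mul_le (by norm_num)]; omega
      have hm2 : PySem.Int.floordiv (lo + hi) 2 < hi := by
        rw [PySem.Int.floordiv_lt_iff_lt_mul (by norm_num)]; omega
      have hQfac : P * prodRange (lo + 1) (PySem.Int.floordiv (lo + hi) 2)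
          = ifac (PySem.Int.floordiv (lo + hi) 2) := by
        rw [hP]; exact ifac_mul_prodRange lo _ hlo hm1
      by_cases hQ : P * prodRange (lo + 1) (PySem.Int.floordiv (lo + hi) 2) < target
      · rw [show bsearchBF (fuel + 1) target lo hi P
            = bsearchBF fuel target (PySem.Int.floordiv (lo + hi) 2) hi
                (P * prodRange (lo + 1) (PySem.Int.floordiv (lo + hi) 2)) by
          simp only [bsearchBF]; rw [if_pos h, if_pos hQ]]
        exact ih _ hi _ (by omega) (by omega) (by omega) hQfac
          (Or.inr (hQfac ▸ hQ)) hhi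
      · rw [show bsearchBF (fuel + 1) target lo hi P
            = bsearchBF fuel target lo (PySem.Int.floordiv (lo + hi) 2) P by
          simp only [bsearchBF]; rw [if_pos h, if_neg hQ]]
        exact ih lo _ P (by omega) hlo (by omega) hP hor (hQfac ▸ not_lt.mp hQ)
    · rw [show bsearchBF (fuel + 1) target lo hi P = lo by simp [bsearchBF, h]]
      have hhi' : hi = lo + 1 := by omega
      exact ⟨hlo, hor, hhi' ▸ hhi⟩

theorem gallopBF_inv (target : Int) : ∀ (fuel : Nat) (lo P : Int), 1 ≤ lo → 1 ≤ P →
    (target - P).toNat < fuel → P = ifac lo → (lo = 1 ∨ ifac lo < target) →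
    1 ≤ (gallopBF fuel target lo P).1 ∧
      (gallopBF fuel target lo P).2 = ifac (gallopBF fuel target lo P).1 ∧
      ((gallopBF fuel target lo P).1 = 1 ∨ ifac (gallopBF fuel target lo P).1 < target) ∧
      target ≤ ifac (2 * (gallopBF fuel target lo P).1) := by
  intro fuel
  induction fuel with
  | zero => intro lo P _ _ hf _ _; exact absurd hf (Nat.not_lt_zero _)
  | succ fuel ih =>
    intro lo P hlo hP hf hfac hor
    have hQfac : P * prodRange (lo + 1) (2 * lo) = ifac (2 * lo) := by
      rw [hfac]; exact ifac_mul_prodRange lo (2 * lo) hlo (by omega)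
    have hge := prodRange_ge_left (lo + 1) (2 * lo) (by omega) (by omega)
    have hPQ : P < P * prodRange (lo + 1) (2 * lo) := by nlinarith
    by_cases h : P * prodRange (lo + 1) (2 * lo) < target
    · rw [show gallopBF (fuel + 1) target lo P
          = gallopBF fuel target (2 * lo) (P * prodRange (lo + 1) (2 * lo)) by
        simp [gallopBF, h]]
      exact ih (2 * lo) _ (by omega) (by omega) (by omega) hQfac (Or.inr (hQfac ▸ h))
    · rw [show gallopBF (fuel + 1) target lo P = (lo, P) by simp [gallopBF, h]]
      exact ⟨hlo, hfac, hor, hQfac ▸ not_lt.mp h⟩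

-- ===== VERDICT (by name: the statement is the Claim_ definition above) =====
theorem getNumberByDigitsOfFactorial_spec : Claim_equal_getNumberByDigitsOfFactorial := by
  intro digits _
  unfold Spec_getNumberByDigitsOfFactorial getNumberByDigitsOfFactorial getNumberByDigitsOfFactorial_alt
  set T : Int := if digits < 0 then 0 else 10 ^ digits.toNat with hT
  have hifac1 : ifac 1 = 1 := by simp [ifac]
  have hA := loopAF_ans T ((T - 2).toNat + 1) 2 1 (by norm_num) (by norm_num)
    (by omega) (by rw [show (2 : Int) - 1 = 1 by ring, hifac1]) (Or.inl rfl)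
  have hg := gallopBF_inv T ((T - 1).toNat + 1) 1 1 (by norm_num) (by norm_num)
    (by omega) (by rw [hifac1]) (Or.inl rfl)
  obtain ⟨h1, h2, h3, h4⟩ := hg
  have hB := bsearchBF_ans T ((2 * (gallopBF ((T - 1).toNat + 1) T 1 1).1
      - (gallopBF ((T - 1).toNat + 1) T 1 1).1).toNat + 1) _ _ _
    (by omega) h1 (by omega) h2 h3 h4
  exact AnsIs_unique hA hB
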